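-- pv_equiv track=rewrite | github.com/Gatorix/M2TC | core/opxls.py | get_vaild_index
-- ===== SOURCE A (Python) =====
-- def get_vaild_index(all_list, vaild_list_index):
--     for i in range(len(all_list)):
--         if all_list[i] == all_list[i-1] and i != 0:
--             pass
--         else:
--             vaild_list_index.append(
--                 all_list.index(all_list[i]))
--     return vaild_list_index
-- ===== SOURCE B (Python) =====
-- def get_vaild_index(all_list, vaild_list_index):
--     # Walk the list run by run: record the first global occurrence of each
--     # run's key, then skip the whole run at once.
--     rest = all_list
--     while rest:
--         key = rest[0]
--         vaild_list_index.append(all_list.index(key))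
--         k = 1
--         while k < len(rest) and rest[k] == key:
--             k += 1
--         rest = rest[k:]
--     return vaild_list_index
-- ===== Notes on version B (the rewrite author's own statement) =====
-- stated objective: idiomatic
-- what changed: B iterates over maximal runs of equal consecutive elements (skipping each whole run at once) instead of A's per-index loop with an all_list[i] == all_list[i-1] / i != 0 branch; the .index(key) first-occurrence lookup is kept.
import Mathlib
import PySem

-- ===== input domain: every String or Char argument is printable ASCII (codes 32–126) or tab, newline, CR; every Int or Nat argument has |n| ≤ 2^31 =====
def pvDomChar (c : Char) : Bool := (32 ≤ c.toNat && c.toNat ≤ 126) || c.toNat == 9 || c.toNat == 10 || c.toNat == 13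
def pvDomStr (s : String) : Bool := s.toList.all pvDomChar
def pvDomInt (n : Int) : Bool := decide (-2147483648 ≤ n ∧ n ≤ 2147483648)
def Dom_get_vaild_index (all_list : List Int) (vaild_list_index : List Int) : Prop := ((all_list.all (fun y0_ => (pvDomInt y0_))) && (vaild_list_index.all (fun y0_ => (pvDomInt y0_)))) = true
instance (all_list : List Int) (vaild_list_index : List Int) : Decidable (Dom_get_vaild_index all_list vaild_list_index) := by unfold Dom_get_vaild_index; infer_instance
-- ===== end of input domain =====

-- B iterates over maximal runs of equal consecutive elements instead of A's per-index
-- previous-element comparison; same .index first-occurrence lookup, same cost (idiomatic).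
-- Both A and B append to vaild_list_index in place; the equivalence proved is about the
-- returned value (the mutation is the same list of appends in both).


-- ===== PORT A =====
-- for i in range(len(all_list)): if all_list[i] == all_list[i-1] and i != 0: pass
-- else: append(all_list.index(all_list[i])).  Indices are always in range (at i = 0 the
-- read all_list[-1] hits the last element of a nonempty list), so .getD never fires its default.
def get_vaild_index (all_list : List Int) (vaild_list_index : List Int) : List Int :=
  (PySem.List.pyRange 0 all_list.length 1).foldl
    (fun acc i =>
      if (PySem.List.pyGet? all_list i == PySem.List.pyGet? all_list (i - 1)) && !(i == 0) then
        acc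
      else
        acc ++ [((PySem.List.index? all_list ((PySem.List.pyGet? all_list i).getD 0)).getD 0 : Int)])
    vaild_list_index

-- ===== PORT B =====
-- while rest: key = rest[0]; append(all_list.index(key)); rest = rest with the whole
-- leading run of key removed.  The inner k-advancing while loop is the dropWhile.
def pvAltLoop (all_list : List Int) : List Int → List Int → List Int
  | [], acc => acc
  | x :: xs, acc =>
      pvAltLoop all_list (xs.dropWhile (· == x))
        (acc ++ [((PySem.List.index? all_list x).getD 0 : Int)])
  termination_by rest => rest.length
  decreasing_by simpa using Nat.lt_succ_of_le (List.length_dropWhile_le _ _)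

def get_vaild_index_alt (all_list : List Int) (vaild_list_index : List Int) : List Int :=
  pvAltLoop all_list all_list vaild_list_index

-- ===== PRECONDITION & SPEC =====
def Spec_get_vaild_index (all_list : List Int) (vaild_list_index : List Int) (out : List Int) : Prop := out = get_vaild_index_alt all_list vaild_list_index
instance (all_list : List Int) (vaild_list_index : List Int) (out : List Int) : Decidable (Spec_get_vaild_index all_list vaild_list_index out) := by unfold Spec_get_vaild_index; infer_instance

-- ===== CLAIM (what is proved, stated in full; the proofs are below) =====
def Claim_equal_get_vaild_index : Prop := ∀ (all_list : List Int) (vaild_list_index : List Int), Dom_get_vaild_index all_list vaild_list_index → Spec_get_vaild_index all_list vaild_list_index (get_vaild_index all_list vaild_list_index)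

-- ===== LEMMAS AND PROOFS =====

-- A's loop from index a (a ≥ 1) onward, with previous element prev = l[a-1], equals B's
-- run loop on the suffix l.drop a with the current run of prev already stripped.
lemma pvLoop_eq (l : List Int) :
    ∀ (k a : Nat) (prev : Int) (acc : List Int),
      a + k = l.length → 1 ≤ a →
      PySem.List.pyGet? l ((a : Int) - 1) = some prev →
      (PySem.List.pyRange (a : Int) l.length 1).foldl
        (fun acc i =>
          if (PySem.List.pyGet? l i == PySem.List.pyGet? l (i - 1)) && !(i == 0) then
            acc
          else
            acc ++ [((PySem.List.index? l ((PySem.List.pyGet? l i).getD 0)).getD 0 : Int)]) acc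
        = pvAltLoop l ((l.drop a).dropWhile (· == prev)) acc := by
  intro k
  induction k with
  | zero =>
      intro a prev acc hlen _ _
      rw [PySem.List.pyRange_one_eq_nil (by omega)]
      simp [show a = l.length by omega, pvAltLoop]
  | succ k ih =>
      intro a prev acc hlen ha hprev
      have hlt : a < l.length := by omega
      have hget : PySem.List.pyGet? l ((a : Int)) = some l[a] :=
        PySem.List.pyGet?_ofNat l a hlt
      rw [PySem.List.pyRange_one_cons (by exact_mod_cast (by omega : (a:Int) < l.length))]
      simp only [List.foldl_cons, hget, hprev, Option.getD_some]
      have hdrop : l.drop a = l[a] :: l.drop (a + 1) := List.drop_eq_getElem_cons hlt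
      have hcast : ((a : Int) + 1) = ((a + 1 : Nat) : Int) := by push_cast; ring
      by_cases h : l[a] = prev
      · have : ((some l[a] == some prev) && !((a : Int) == 0)) = true := by
          simp [h]; omega
        rw [this, if_pos rfl, hcast,
          ih (a + 1) prev acc (by omega) (by omega) (by rw [show ((a+1:Nat):Int) - 1 = (a:Int) by push_cast; ring, hget, h])]
        rw [hdrop]
        simp [h]
      · have : ((some l[a] == some prev) && !((a : Int) == 0)) = false := by
          simp [h]
        rw [this, if_neg (by simp), hcast,
          ih (a + 1) l[a] _ (by omega) (by omega) (by rw [show ((a+1:Nat):Int) - 1 = (a:Int) by push_cast; ring, hget])]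
        rw [hdrop]
        conv_rhs => rw [List.dropWhile_cons]
        simp only [show (l[a] == prev) = false by simp [h], Bool.false_eq_true, if_false]
        rw [pvAltLoop]

-- ===== VERDICT (by name: the statement is the Claim_ definition above) =====
theorem get_vaild_index_spec : Claim_equal_get_vaild_index := by
  unfold Claim_equal_get_vaild_index
  intro l v _
  unfold Spec_get_vaild_index get_vaild_index get_vaild_index_alt
  match l with
  | [] => simp [PySem.List.pyRange_one_eq_nil, pvAltLoop]
  | x :: t =>
      rw [PySem.List.pyRange_one_cons (by simp)]
      simp only [List.foldl_cons]
      have h0 : PySem.List.pyGet? (x :: t) (0 : Int) = some x := by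
        simp
      rw [show ((PySem.List.pyGet? (x :: t) 0 == PySem.List.pyGet? (x :: t) (0 - 1)) && !((0:Int) == 0)) = false by simp]
      simp only [Bool.false_eq_true, if_false, h0, Option.getD_some]
      rw [show ((0:Int) + 1) = ((1:Nat) : Int) by norm_num,
        pvLoop_eq (x :: t) t.length 1 x _ (by simp [Nat.add_comm]) (by omega) (by simp)]
      simp [pvAltLoop]
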